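-- pv_equiv track=rewrite | github.com/MrBrantCode/unitest_baseline | mut_generate/mist_train_cf/cf_93855/solution.py | group_students
-- ===== SOURCE A (Python) =====
-- def group_students(student_list):
--     result = {}
--
--     for student in student_list:
--         major = student["major"]
--         name = student["name"]
--
--         if major in result:
--             result[major].append(name)
--         else:
--             result[major] = [name]
--
--     for major in result:
--         result[major].sort()
--
--     return result
-- ===== SOURCE B (Python) =====
-- def group_students(student_list):
--     # buckets in first-occurrence order of each major
--     result = {student["major"]: [] for student in student_list}
--     # one global sort by name; appending in this order leaves every bucket sorted
--     for student in sorted(student_list, key=lambda s: s["name"]):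
--         result[student["major"]].append(student["name"])
--     return result
-- ===== Notes on version B (the rewrite author's own statement) =====
-- stated objective: alternative
-- what changed: Instead of appending names per major and then sorting every bucket, B sorts the whole student list by name once and fills buckets (pre-created in first-occurrence order) with a single appending pass, so no per-bucket sort is needed.
import Mathlib
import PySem

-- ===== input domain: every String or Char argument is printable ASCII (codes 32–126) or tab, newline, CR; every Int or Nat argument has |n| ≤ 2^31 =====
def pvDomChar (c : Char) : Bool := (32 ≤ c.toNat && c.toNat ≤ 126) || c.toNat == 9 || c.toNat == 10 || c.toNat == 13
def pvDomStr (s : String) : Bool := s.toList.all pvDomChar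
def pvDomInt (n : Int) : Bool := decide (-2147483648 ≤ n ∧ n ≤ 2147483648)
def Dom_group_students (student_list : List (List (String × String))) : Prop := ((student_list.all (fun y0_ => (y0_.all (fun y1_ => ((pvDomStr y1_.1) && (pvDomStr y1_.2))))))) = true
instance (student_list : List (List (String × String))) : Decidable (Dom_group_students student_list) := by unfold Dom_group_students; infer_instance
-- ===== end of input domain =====

-- B groups by one global sort by name plus a single appending pass (no per-bucket sort); equivalence of RETURN values.

-- student["major"] / student["name"]: dict lookup; missing key = KeyError, excluded by Pre_ (default "" is never used inside Pre_)
def pvMajor (student : List (String × String)) : String :=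
  ((PySem.Dict.mk student).get? "major").getD ""

def pvNameOf (student : List (String × String)) : String :=
  ((PySem.Dict.mk student).get? "name").getD ""

-- ===== PORT A =====
def group_students (student_list : List (List (String × String))) : List (String × List String) :=
  let result : PySem.Dict String (List String) := student_list.foldl
    (fun result student =>
      let major := pvMajor student
      let name := pvNameOf student
      if result.contains major then
        result.modify major [] (fun l => l ++ [name])        -- result[major].append(name)
      else
        result.insert major [name])                          -- result[major] = [name]
    PySem.Dict.empty
  (result.keys.foldl                                          -- for major in result: result[major].sort()
    (fun r major => r.modify major [] (fun l => PySem.List.sorted l (fun x => x)))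
    result).items

-- ===== PORT B =====
def group_students_alt (student_list : List (List (String × String))) : List (String × List String) :=
  let result : PySem.Dict String (List String) := student_list.foldl
    (fun r student => r.insert (pvMajor student) []) PySem.Dict.empty   -- {s["major"]: [] for s in student_list}
  let ordered := PySem.List.sorted student_list pvNameOf                 -- sorted(student_list, key=lambda s: s["name"])
  (ordered.foldl
    (fun r student => r.modify (pvMajor student) [] (fun l => l ++ [pvNameOf student]))  -- result[s["major"]].append(s["name"])
    result).items

-- ===== PRECONDITION & SPEC =====
-- Pre_ excludes exactly the inputs where Python A raises KeyError: a student missing key "major" or "name".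
def Pre_group_students (student_list : List (List (String × String))) : Prop :=
  ∀ student ∈ student_list,
    (PySem.Dict.mk student).contains "major" = true ∧ (PySem.Dict.mk student).contains "name" = true
instance (student_list : List (List (String × String))) : Decidable (Pre_group_students student_list) := by
  unfold Pre_group_students; infer_instance

def pvWitness_group_students : (List (List (String × String))) :=
  [[("major", "cs"), ("name", "bob")], [("major", "cs"), ("name", "ann")], [("major", "ee"), ("name", "zoe")]]

def Spec_group_students (student_list : List (List (String × String))) (out : List (String × List String)) : Prop := out = group_students_alt student_list
instance (student_list : List (List (String × String))) (out : List (String × List String)) : Decidable (Spec_group_students student_list out) := by unfold Spec_group_students; infer_instance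

-- ===== CLAIM (what is proved, stated in full; the proofs are below) =====
def Claim_equal_group_students : Prop := ∀ (student_list : List (List (String × String))), Dom_group_students student_list → Pre_group_students student_list → Spec_group_students student_list (group_students student_list)

-- ===== LEMMAS AND PROOFS =====

-- names of the students with major c, in list order
def pvNames (l : List (List (String × String))) (c : String) : List String :=
  (List.map (fun s => (pvMajor s, pvNameOf s)) l |>.filter (fun p => p.1 == c)).map (fun p => p.2)

-- A's first loop: the contains-branch IS one unconditional modify (modify = insert (f (getD k dflt)))
theorem astep_eq_modify (d : PySem.Dict String (List String)) (s : List (String × String)) :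
    (if d.contains (pvMajor s) then d.modify (pvMajor s) [] (fun l => l ++ [pvNameOf s])
     else d.insert (pvMajor s) [pvNameOf s])
      = d.modify (pvMajor s) [] (fun l => l ++ [pvNameOf s]) := by
  by_cases h : d.contains (pvMajor s) = true
  · simp [h]
  · simp only [Bool.not_eq_true] at h
    simp [h, PySem.Dict.modify, PySem.Dict.getD_of_not_contains _ _ h]

-- getD after a modify-append loop keyed by pvMajor
theorem getD_groupfold (l : List (List (String × String))) (d : PySem.Dict String (List String)) (c : String) :
    (l.foldl (fun d s => d.modify (pvMajor s) [] (fun v => v ++ [pvNameOf s])) d).getD c []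
      = d.getD c [] ++ pvNames l c := by
  have h := PySem.Dict.getD_foldl_modify_append (List.map (fun s => (pvMajor s, pvNameOf s)) l) d c
  rw [List.foldl_map] at h
  exact h

-- sorting loop over a Nodup key list: each present key's value gets f once
theorem getD_sortfold (f : List String → List String) (ks : List String) (hnd : ks.Nodup)
    (r : PySem.Dict String (List String)) (k : String) :
    (ks.foldl (fun r m => r.modify m [] f) r).getD k []
      = if k ∈ ks then f (r.getD k []) else r.getD k [] := by
  induction ks generalizing r with
  | nil => simp
  | cons m t ih =>
    simp only [List.nodup_cons] at hnd
    rw [List.foldl_cons, ih hnd.2]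
    by_cases hk : k ∈ t
    · have : k ≠ m := fun h => hnd.1 (h ▸ hk)
      simp [hk, this, PySem.Dict.getD_modify]
    · by_cases hm : k = m
      · subst hm; simp [hk]
      · simp [hk, hm, PySem.Dict.getD_modify]

theorem set_update_of_subset (s : PySem.Set String) (xs : List String) (h : ∀ x ∈ xs, x ∈ s) :
    PySem.Set.update s xs = s := by
  induction xs generalizing s with
  | nil => rfl
  | cons x t ih =>
    have hx : PySem.Set.add s x = s := PySem.Set.add_of_mem (h x (by simp))
    show PySem.Set.update (PySem.Set.add s x) t = s
    rw [hx]
    exact ih s (fun y hy => h y (by simp [hy]))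

-- B's comprehension dict: every value is []
theorem getD_initfold (l : List (List (String × String))) (d : PySem.Dict String (List String))
    (hd : ∀ c, d.getD c [] = []) (c : String) :
    (l.foldl (fun r s => r.insert (pvMajor s) []) d).getD c [] = [] := by
  induction l generalizing d with
  | nil => exact hd c
  | cons s t ih =>
    refine ih _ (fun c' => ?_)
    rw [PySem.Dict.getD_insert]
    split <;> simp [hd]

-- the bucket of major c, read off the name-sorted list, IS the sorted bucket
theorem sorted_bucket (l : List (List (String × String))) (c : String) :
    PySem.List.sorted (pvNames l c) (fun x => x)
      = pvNames (PySem.List.sorted l pvNameOf) c := by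
  apply PySem.List.sorted_id_eq_of_perm_of_pairwise
  · have h1 : (PySem.List.sorted l pvNameOf).Perm l := PySem.List.sorted_perm l pvNameOf false
    have h2 := h1.map (fun s => (pvMajor s, pvNameOf s))
    have h3 := List.Perm.filter (fun p => p.1 == c) h2
    simpa [pvNames] using h3.map (fun p => p.2)
  · have hp : List.Pairwise (fun a b => pvNameOf a ≤ pvNameOf b) (PySem.List.sorted l pvNameOf) :=
      PySem.List.sorted_pairwise l pvNameOf
    have hp2 : List.Pairwise (fun (a b : String × String) => a.2 ≤ b.2)
        (List.map (fun s => (pvMajor s, pvNameOf s)) (PySem.List.sorted l pvNameOf)) := by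
      rw [List.pairwise_map]; exact hp
    have hp3 := hp2.sublist (List.filter_sublist (p := fun p => p.1 == c))
    unfold pvNames
    rw [List.pairwise_map]
    exact hp3

-- ===== VERDICT (by name: the statement is the Claim_ definition above) =====
theorem group_students_spec : Claim_equal_group_students := by
  intro l _ _
  show group_students l = group_students_alt l
  unfold group_students group_students_alt
  simp only []
  -- name the three dictionaries
  set dA := l.foldl
    (fun result student =>
      if result.contains (pvMajor student) then
        result.modify (pvMajor student) [] (fun v => v ++ [pvNameOf student])
      else result.insert (pvMajor student) [pvNameOf student]) PySem.Dict.empty with hdA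
  set dB0 := l.foldl (fun r s => r.insert (pvMajor s) []) PySem.Dict.empty with hdB0
  set ordered := PySem.List.sorted l pvNameOf with hord
  set dB := ordered.foldl
    (fun r s => r.modify (pvMajor s) [] (fun v => v ++ [pvNameOf s])) dB0 with hdB
  -- A's first loop is the unconditional modify loop
  have hA : dA = l.foldl (fun d s => d.modify (pvMajor s) [] (fun v => v ++ [pvNameOf s]))
      PySem.Dict.empty := by
    rw [hdA]
    exact PySem.List.foldl_congr_mem l _ _ PySem.Dict.empty (fun d s _ => astep_eq_modify d s)
  -- keys
  have hkA' : dA.keys = PySem.Set.ofList (l.map pvMajor) := by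
    rw [hA]
    exact (PySem.Dict.keys_foldl_modify_key l pvMajor ([] : List String)
      (fun _ s v => v ++ [pvNameOf s]) PySem.Dict.empty).trans rfl
  have hndA : dA.keys.Nodup := by
    rw [hA]
    exact PySem.Dict.nodup_keys_foldl_modify_key l pvMajor ([] : List String)
      (fun _ s v => v ++ [pvNameOf s]) PySem.Dict.empty PySem.Dict.nodup_keys_empty
  have hkB0 : dB0.keys = PySem.Set.ofList (l.map pvMajor) := by
    rw [hdB0]
    exact (PySem.Dict.keys_foldl_insert_key l pvMajor (fun _ _ => ([] : List String))
      PySem.Dict.empty).trans rfl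
  have hkB : dB.keys = PySem.Set.ofList (l.map pvMajor) := by
    rw [hdB]
    refine (PySem.Dict.keys_foldl_modify_key ordered pvMajor ([] : List String)
      (fun _ s v => v ++ [pvNameOf s]) dB0).trans ?_
    rw [hkB0]
    apply set_update_of_subset
    intro x hx
    rw [PySem.Set.mem_ofList]
    have hperm : (ordered.map pvMajor).Perm (l.map pvMajor) :=
      (PySem.List.sorted_perm l pvNameOf false).map pvMajor
    exact hperm.mem_iff.mp hx
  have hndB : dB.keys.Nodup := by
    rw [hdB]
    refine PySem.Dict.nodup_keys_foldl_modify_key ordered pvMajor ([] : List String)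
      (fun _ s v => v ++ [pvNameOf s]) dB0 ?_
    rw [hdB0]
    exact PySem.Dict.nodup_keys_foldl_insert_key l pvMajor _ _ PySem.Dict.nodup_keys_empty
  -- per-key values
  have hvA : ∀ c, dA.getD c [] = pvNames l c := by
    intro c
    rw [hA, getD_groupfold, PySem.Dict.getD_empty, List.nil_append]
  have hvB : ∀ c, dB.getD c [] = pvNames ordered c := by
    intro c
    rw [hdB, getD_groupfold, getD_initfold l PySem.Dict.empty (fun c' => PySem.Dict.getD_empty c' []) c,
      List.nil_append]
  -- A's sorting pass
  set dAS := dA.keys.foldl (fun r m => r.modify m [] (fun v => PySem.List.sorted v (fun x => x))) dA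
    with hdAS
  have hkAS : dAS.keys = dA.keys := by
    rw [hdAS, PySem.Dict.keys_foldl_modify]
    exact set_update_of_subset _ _ (fun x hx => hx)
  have hndAS : dAS.keys.Nodup := hkAS ▸ hndA
  have hvAS : ∀ c ∈ dA.keys, dAS.getD c [] = PySem.List.sorted (pvNames l c) (fun x => x) := by
    intro c hc
    rw [hdAS, getD_sortfold _ dA.keys hndA dA c, if_pos hc, hvA]
  -- assemble
  rw [PySem.Dict.items_eq_map_keys dAS hndAS [], PySem.Dict.items_eq_map_keys dB hndB [],
    hkAS, hkA', hkB]
  apply List.map_congr_left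
  intro c hc
  have hc' : c ∈ dA.keys := by rw [hkA']; exact hc
  rw [hvAS c hc', hvB, sorted_bucket]
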